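-- pv_equiv track=rewrite | github.com/londrwus/EGE-2024 | N23/12.py | f
-- ===== SOURCE A (Python) =====
-- def f(x, stop, step):
--     if x > stop:
--         return 0
--     if x == stop:
--         return 1
--
--     if step == "*":
--         return f(x + 1, stop, step="+") + f(x + 2, stop, step="+")
--     else:
--         return (
--             f(x + 1, stop, step="+")
--             + f(x + 2, stop, step="+")
--             + f(x * 2, stop, step="*")
--         )
-- ===== SOURCE B (Python) =====
-- def f(x, stop, step):
--     if x > stop:
--         return 0
--     if x == stop:
--         return 1
--     n = stop - x
--     # plus[i] = number of sequences from value x+i when doubling is allowed;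
--     # plus[n] = 1 (reached stop), plus[n+1], plus[n+2] stay 0 (overshoot).
--     plus = [0] * (n + 3)
--     plus[n] = 1
--     for i in range(n - 1, -1, -1):
--         v = x + i
--         d = 2 * v
--         if d == stop:
--             s2 = 1
--         elif d > stop:
--             s2 = 0
--         else:
--             s2 = plus[d + 1 - x] + plus[d + 2 - x]
--         plus[i] = plus[i + 1] + plus[i + 2] + s2
--     if step == "*":
--         return plus[1] + plus[2]
--     return plus[0]
-- ===== Notes on version B (the rewrite author's own statement) =====
-- stated objective: alternative
-- what changed: Replaced A's exponential branching recursion over the (+1, +2, *2) moves by a single bottom-up dynamic-programming pass that fills a table of path counts from stop down to x.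
import Mathlib
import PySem

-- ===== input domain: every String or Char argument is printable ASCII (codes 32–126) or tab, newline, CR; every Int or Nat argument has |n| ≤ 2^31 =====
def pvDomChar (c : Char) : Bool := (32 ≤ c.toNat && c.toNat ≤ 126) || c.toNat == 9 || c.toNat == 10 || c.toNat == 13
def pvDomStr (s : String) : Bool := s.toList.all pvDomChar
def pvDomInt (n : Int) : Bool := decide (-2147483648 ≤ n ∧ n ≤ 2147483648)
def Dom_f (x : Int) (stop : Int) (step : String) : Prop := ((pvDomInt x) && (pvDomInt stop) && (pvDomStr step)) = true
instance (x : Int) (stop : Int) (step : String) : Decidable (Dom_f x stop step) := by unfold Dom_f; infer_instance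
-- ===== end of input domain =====

-- B replaces A's branching recursion by a single bottom-up DP pass over the values from
-- stop down to x (objective: alternative).

-- ===== PORT A =====
-- A is recursive; the fuel only makes the recursion total in Lean (on every input admitted by
-- Pre_f the fuel is more than the recursion depth, proved in fA_eq_C below).
def fA : Nat → Int → Int → String → Int
  | 0, _, _, _ => 0
  | fuel+1, x, stop, step =>
    if x > stop then 0
    else if x == stop then 1
    else if step == "*" then
      fA fuel (x + 1) stop "+" + fA fuel (x + 2) stop "+"
    else
      fA fuel (x + 1) stop "+" + fA fuel (x + 2) stop "+" + fA fuel (x * 2) stop "*"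

def f (x : Int) (stop : Int) (step : String) : Int :=
  fA (2 * (stop - x).toNat + 2) x stop step

-- ===== PORT B =====
-- loop body of Source B (one iteration of `for i in range(n-1, -1, -1)`)
def bStep (x : Int) (stop : Int) (plus : List Int) (i : Int) : List Int :=
  let v := x + i
  let d := 2 * v
  let s2 : Int :=
    if d == stop then 1
    else if d > stop then 0
    else PySem.List.pyGetD plus (d + 1 - x) 0 + PySem.List.pyGetD plus (d + 2 - x) 0
  PySem.List.pySetD plus i
    (PySem.List.pyGetD plus (i + 1) 0 + PySem.List.pyGetD plus (i + 2) 0 + s2)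

def f_alt (x : Int) (stop : Int) (step : String) : Int :=
  if x > stop then 0
  else if x == stop then 1
  else
    let n : Int := stop - x
    let plus0 : List Int := PySem.List.pySetD (List.replicate (n + 3).toNat (0 : Int)) n 1
    let plus := (PySem.List.pyRange (n - 1) (-1) (-1)).foldl (bStep x stop) plus0
    if step == "*" then PySem.List.pyGetD plus 1 0 + PySem.List.pyGetD plus 2 0
    else PySem.List.pyGetD plus 0 0

-- ===== PRECONDITION & SPEC =====
-- Pre_f excludes exactly the inputs with x < 0 and x < stop: there A's recursion never
-- terminates (Python raises RecursionError), e.g. f(-1, 1, "+") calls f(-2, 1, "*") which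
-- calls f(-1, 1, "+") again. A returns on every input admitted by Pre_f.
def Pre_f (x : Int) (stop : Int) (step : String) : Prop := 0 ≤ x ∨ stop ≤ x
instance (x : Int) (stop : Int) (step : String) : Decidable (Pre_f x stop step) := by
  unfold Pre_f; infer_instance

def pvWitness_f : Int × Int × String := (0, 6, "+")

def Spec_f (x : Int) (stop : Int) (step : String) (out : Int) : Prop := out = f_alt x stop step
instance (x : Int) (stop : Int) (step : String) (out : Int) : Decidable (Spec_f x stop step out) := by
  unfold Spec_f; infer_instance

-- ===== CLAIM (what is proved, stated in full; the proofs are below) =====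
-- ===== CLAIM (what is proved, stated in full; the proofs are below) =====
def Claim_equal_f : Prop := ∀ (x : Int) (stop : Int) (step : String),
  Dom_f x stop step → Pre_f x stop step → Spec_f x stop step (f x stop step)

-- ===== LEMMAS AND PROOFS =====

def C (stop v : Int) (star : Bool) : Int :=
  if _h1 : stop < v then 0
  else if _h2 : v = stop then 1
  else if _h3 : v < 0 then 0
  else if _hs : star then C stop (v + 1) false + C stop (v + 2) false
  else C stop (v + 1) false + C stop (v + 2) false + C stop (2 * v) true
termination_by 2 * (stop - v).toNat + (if star then 0 else 1)
decreasing_by all_goals (simp_all; omega)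

theorem fA_eq_C (fuel : Nat) (x stop : Int) (step : String)
    (hx : 0 ≤ x ∨ stop ≤ x)
    (hfuel : 2 * (stop - x).toNat + (if step == "*" then 1 else 2) ≤ fuel) :
    fA fuel x stop step = C stop x (step == "*") := by
  have hps : (("+" : String) == "*") = false := by decide
  induction fuel generalizing x step with
  | zero =>
    exfalso
    cases hst : (step == "*") <;> rw [hst] at hfuel <;> simp at hfuel
  | succ fuel ih =>
    rw [fA, C]
    by_cases h1 : x > stop
    · simp [h1]
    · by_cases h2 : x = stop
      · simp [h2]
      · have hxs : x < stop := by omega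
        have hx0 : 0 ≤ x := by rcases hx with h | h <;> omega
        have hb : (x == stop) = false := by simp [h2]
        have hlt : ¬ stop < x := by omega
        have hneg : ¬ x < 0 := by omega
        have hplus : 2 * (stop - (x + 1)).toNat + 2 ≤ fuel ∧
            2 * (stop - (x + 2)).toNat + 2 ≤ fuel := by
          cases hst : (step == "*") <;> rw [hst] at hfuel <;>
            simp only [if_true, if_false, Bool.false_eq_true] at hfuel <;> omega
        cases hstar : (step == "*") with
        | true =>
          rw [hstar] at hfuel
          simp only [if_neg h1, hb, Bool.false_eq_true, if_false, hstar, if_true,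
            dif_neg hlt, dif_neg h2, dif_neg hneg]
          rw [ih (x+1) "+" (by omega) (by rw [hps]; simpa using hplus.1),
              ih (x+2) "+" (by omega) (by rw [hps]; simpa using hplus.2)]
          simp [hps]
        | false =>
          rw [hstar] at hfuel
          simp only [if_true, if_false, Bool.false_eq_true] at hfuel
          simp only [if_neg h1, hb, Bool.false_eq_true, if_false, hstar,
            dif_neg hlt, dif_neg h2, dif_neg hneg]
          rw [ih (x+1) "+" (by omega) (by rw [hps]; simpa using hplus.1),
              ih (x+2) "+" (by omega) (by rw [hps]; simpa using hplus.2),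
              ih (x*2) "*" (by omega) (by simp only [BEq.rfl, if_true]; omega)]
          rw [show x * 2 = 2 * x from by ring]
          simp [hps]

-- invariant of Source B's DP loop: all cells with index ≥ i already hold the reference counts
def DPInv (x stop : Int) (n i : Nat) (plus : List Int) : Prop :=
  plus.length = n + 3 ∧
  ∀ j : Nat, i ≤ j → j < n + 3 → PySem.List.pyGetD plus (j : Int) 0 = C stop (x + j) false

theorem C_gt (stop v : Int) (star : Bool) (h : stop < v) : C stop v star = 0 := by
  rw [C, dif_pos h]

theorem C_self (stop : Int) (star : Bool) : C stop stop star = 1 := by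
  rw [C, dif_neg (by omega), dif_pos rfl]

theorem C_plus (stop v : Int) (h0 : 0 ≤ v) (h : v < stop) :
    C stop v false = C stop (v + 1) false + C stop (v + 2) false + C stop (2 * v) true := by
  rw [C, dif_neg (by omega), dif_neg (by omega), dif_neg (by omega)]
  simp

theorem C_star (stop v : Int) (h0 : 0 ≤ v) (h : v < stop) :
    C stop v true = C stop (v + 1) false + C stop (v + 2) false := by
  rw [C, dif_neg (by omega), dif_neg (by omega), dif_neg (by omega)]
  simp

theorem step_inv (x stop : Int) (n i : Nat) (hx : 0 ≤ x) (hstop : stop = x + n)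
    (hi : i < n) (plus : List Int) (h : DPInv x stop n (i+1) plus) :
    DPInv x stop n i (bStep x stop plus (i : Int)) := by
  obtain ⟨hlen, hval⟩ := h
  have hilen : i < plus.length := by omega
  unfold bStep
  dsimp only
  refine ⟨by rw [PySem.List.length_pySetD]; exact hlen, ?_⟩
  intro j hij hjn
  rw [PySem.List.pyGetD_pySetD_natCast _ _ _ _ _ hilen]
  by_cases hj : j = i
  · rw [if_pos hj]
    subst hj
    -- the two adjacent cells
    have e1 : (j : Int) + 1 = ((j + 1 : Nat) : Int) := by push_cast; ring
    have e2 : (j : Int) + 2 = ((j + 2 : Nat) : Int) := by push_cast; ring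
    rw [e1, e2, hval (j+1) (by omega) (by omega), hval (j+2) (by omega) (by omega)]
    -- the doubling cell
    have hs2 : (if (2 * (x + (j : Int)) == stop) = true then (1 : Int)
        else if 2 * (x + (j : Int)) > stop then 0
        else PySem.List.pyGetD plus (2 * (x + (j : Int)) + 1 - x) 0 +
             PySem.List.pyGetD plus (2 * (x + (j : Int)) + 2 - x) 0) =
        C stop (2 * (x + (j : Int))) true := by
      by_cases hde : 2 * (x + (j : Int)) = stop
      · rw [if_pos (by simpa using hde), hde, C_self]
      · rw [if_neg (by simpa using hde)]
        by_cases hdg : 2 * (x + (j : Int)) > stop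
        · rw [if_pos hdg, C_gt _ _ _ hdg]
        · rw [if_neg hdg]
          have hdlt : 2 * (x + (j : Int)) < stop := by omega
          obtain ⟨k1, hk1⟩ : ∃ k1 : Nat, 2 * (x + (j : Int)) + 1 - x = (k1 : Int) :=
            ⟨(2 * (x + (j : Int)) + 1 - x).toNat, by omega⟩
          obtain ⟨k2, hk2⟩ : ∃ k2 : Nat, 2 * (x + (j : Int)) + 2 - x = (k2 : Int) :=
            ⟨(2 * (x + (j : Int)) + 2 - x).toNat, by omega⟩
          rw [hk1, hk2, hval k1 (by omega) (by omega), hval k2 (by omega) (by omega),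
            C_star stop _ (by omega) hdlt]
          congr 2 <;> omega
    rw [hs2, show x + (↑(j+1) : Int) = x + ↑j + 1 by push_cast; ring,
        show x + (↑(j+2) : Int) = x + ↑j + 2 by push_cast; ring,
        ← C_plus stop (x + (j : Int)) (by omega) (by omega)]
  · rw [if_neg hj]
    exact hval j (by omega) hjn

theorem fold_inv (x stop : Int) (n : Nat) (hx : 0 ≤ x) (hstop : stop = x + n)
    (i : Nat) (hi : i ≤ n) (plus : List Int) (h : DPInv x stop n i plus) :
    DPInv x stop n 0 ((PySem.List.pyRange ((i : Int) - 1) (-1) (-1)).foldl (bStep x stop) plus) := by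
  induction i generalizing plus with
  | zero => simpa [PySem.List.pyRange_neg_one_eq_nil] using h
  | succ i ih =>
    rw [show ((i+1 : Nat) : Int) - 1 = (i : Int) by push_cast; ring,
        PySem.List.pyRange_neg_one_cons (by omega)]
    simp only [List.foldl_cons]
    exact ih (by omega) _ (step_inv x stop n i hx hstop (by omega) plus h)

theorem falt_eq_C (x stop : Int) (step : String) (hx : 0 ≤ x ∨ stop ≤ x) :
    f_alt x stop step = C stop x (step == "*") := by
  unfold f_alt
  dsimp only
  by_cases h1 : x > stop
  · rw [if_pos h1, C_gt _ _ _ h1]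
  · rw [if_neg h1]
    by_cases h2 : x = stop
    · rw [if_pos (by simpa using h2), h2, C_self]
    · rw [if_neg (by simpa using h2)]
      have hxs : x < stop := by omega
      have hx0 : 0 ≤ x := by rcases hx with h | h <;> omega
      set n : Nat := (stop - x).toNat with hn
      have hcast : stop - x = (n : Int) := by omega
      have hstop : stop = x + n := by omega
      -- the initial table satisfies the invariant at i = n
      have hinv0 : DPInv x stop n n
          (PySem.List.pySetD (List.replicate (stop - x + 3).toNat (0 : Int)) (stop - x) 1) := by
        rw [show stop - x = ((n : Nat) : Int) from by omega, PySem.List.pySetD_natCast]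
        constructor
        · simp; omega
        · intro j hij hjn
          rw [PySem.List.pyGetD_natCast]
          rcases Nat.lt_or_ge j ((stop - x + 3).toNat) with hlt | hge
          · rw [List.getD_eq_getElem?_getD, List.getElem?_set]
            by_cases hji : (stop - x).toNat = j
            · have : x + (j : Int) = stop := by omega
              simp [this, C_self, hn.trans hji]
            · have hgt : stop < x + (j : Int) := by omega
              rw [C_gt _ _ _ hgt, if_neg (by rw [hn]; exact hji),
                List.getElem?_replicate_of_lt (by omega)]
              rfl
          · omega
      have hfold := fold_inv x stop n hx0 hstop n le_rfl _ hinv0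
      rw [show stop - x - 1 = (n : Int) - 1 by omega] at *
      have g0 := hfold.2 0 (by omega) (by omega)
      have g1 := hfold.2 1 (by omega) (by omega)
      have g2 := hfold.2 2 (by omega) (by omega)
      norm_num at g0 g1 g2
      cases hst : (step == "*") with
      | true =>
        rw [if_pos rfl, g1, g2, ← C_star stop x hx0 hxs]
      | false =>
        rw [if_neg (by simp), g0]

-- ===== VERDICT (by name: the statement is the Claim_ definition above) =====
theorem f_spec : Claim_equal_f := by
  unfold Claim_equal_f
  intro x stop step _ hpre
  unfold Spec_f
  rw [falt_eq_C x stop step hpre]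
  exact fA_eq_C _ x stop step hpre (by cases h : (step == "*") <;> simp only [h, if_true, if_false, Bool.false_eq_true] <;> omega)
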